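-- pv_equiv track=rewrite | github.com/Dimonka2006/testapp | Python_lesson/My32_Zadach.py | obrabotka
-- ===== SOURCE A (Python) =====
-- def obrabotka(text):
--
--     keys = [key.strip('.,!?').lower() for key in text.split()] # Разбиваем текст на слова, удаляем знаки препинания и приводим слова к нижнему регистру
--
--     result_dict = {}
--     for key in keys:
--
--         if key in result_dict and len(key) > 3: # Проходим по каждому элементу списка
--             result_dict[key] += 1 # Если элемент уже есть в словаре, увеличиваем его счетчик
--
--         elif len(key) > 3:  # добавляем дополнительное условие
--             result_dict[key] = 1 # Если элемент новый, добавляем его со счетчиком 1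
--
--     return result_dict
-- ===== SOURCE B (Python) =====
-- def obrabotka(text):
--     # dedup-then-count: build the filtered token list once, then one count() per distinct word
--     filtered = [w for w in (t.strip('.,!?').lower() for t in text.split()) if len(w) > 3]
--     return {w: filtered.count(w) for w in dict.fromkeys(filtered)}
-- ===== Notes on version B (the rewrite author's own statement) =====
-- stated objective: alternative
-- what changed: Replaces A's incremental dict-update loop (membership test then += / = 1 per token) by a dedup-then-count strategy: build the filtered token list, take its distinct words in first-occurrence order via dict.fromkeys, and compute each word's total with one list.count call per distinct word.
import Mathlib
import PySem

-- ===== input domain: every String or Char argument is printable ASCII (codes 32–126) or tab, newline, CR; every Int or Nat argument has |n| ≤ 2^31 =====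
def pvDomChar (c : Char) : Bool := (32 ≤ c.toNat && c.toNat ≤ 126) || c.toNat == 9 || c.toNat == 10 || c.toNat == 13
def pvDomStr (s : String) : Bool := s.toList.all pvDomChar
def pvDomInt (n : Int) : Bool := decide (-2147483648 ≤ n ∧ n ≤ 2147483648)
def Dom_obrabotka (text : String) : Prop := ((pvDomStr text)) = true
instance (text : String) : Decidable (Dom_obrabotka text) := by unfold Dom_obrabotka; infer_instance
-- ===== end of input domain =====

-- B replaces A's incremental dict-update counting loop by dedup-then-count over the filtered token list (alternative decomposition, same results).

-- ===== PORT A =====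
def obrabotka (text : String) : List (String × Int) :=
  let keys := (PySem.Str.split₀ text).map (fun k => PySem.Str.lower (PySem.Str.stripChars k ".,!?"))
  (keys.foldl (fun d key =>
      if d.contains key && decide (PySem.Str.len key > 3) then
        d.insert key ((d.get? key).getD 0 + 1)
      else if PySem.Str.len key > 3 then
        d.insert key 1
      else d)
    (PySem.Dict.empty : PySem.Dict String Int)).items

-- ===== PORT B =====
def obrabotka_alt (text : String) : List (String × Int) :=
  let filtered := ((PySem.Str.split₀ text).map
      (fun t => PySem.Str.lower (PySem.Str.stripChars t ".,!?"))).filter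
      (fun w => decide (PySem.Str.len w > 3))
  -- dict comprehension over dict.fromkeys(filtered): distinct keys in first-occurrence order
  (PySem.List.dedup filtered).map (fun w => (w, (filtered.count w : Int)))

-- ===== PRECONDITION & SPEC =====
def Spec_obrabotka (text : String) (out : List (String × Int)) : Prop := out = obrabotka_alt text
instance (text : String) (out : List (String × Int)) : Decidable (Spec_obrabotka text out) := by unfold Spec_obrabotka; infer_instance

-- ===== CLAIM (what is proved, stated in full; the proofs are below) =====
def Claim_equal_obrabotka : Prop := ∀ (text : String), Dom_obrabotka text → Spec_obrabotka text (obrabotka text)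

-- ===== LEMMAS AND PROOFS =====

-- A's loop, on a dict whose keys all have len > 3, is the counter loop over the filtered list
theorem loopA_eq_counter_loop (keys : List String) (d : PySem.Dict String Int)
    (h : ∀ k, d.contains k = true → PySem.Str.len k > 3) :
    keys.foldl (fun d key =>
      if d.contains key && decide (PySem.Str.len key > 3) then
        d.insert key ((d.get? key).getD 0 + 1)
      else if PySem.Str.len key > 3 then
        d.insert key 1
      else d) d
    = (keys.filter (fun w => decide (PySem.Str.len w > 3))).foldl
        (fun d x => d.insert x (d.getD x 0 + 1)) d := by
  induction keys generalizing d with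
  | nil => rfl
  | cons key rest ih =>
    by_cases hlen : PySem.Str.len key > 3
    · have hstep : (if (d.contains key && decide (PySem.Str.len key > 3)) = true then
          d.insert key ((d.get? key).getD 0 + 1)
        else if PySem.Str.len key > 3 then d.insert key 1 else d)
        = d.insert key (d.getD key 0 + 1) := by
        by_cases hc : d.contains key = true
        · rw [if_pos (by simp only [hc, Bool.true_and, decide_eq_true hlen]), PySem.Dict.getD_eq_get?_getD]
        · simp only [Bool.not_eq_true] at hc
          rw [if_neg (by simp [hc]), if_pos hlen]
          have h0 : d.getD key 0 = 0 := by simp [PySem.Dict.getD_of_not_contains, hc]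
          rw [h0, zero_add]
      rw [List.foldl_cons, hstep, List.filter_cons, if_pos (by simpa using hlen),
        List.foldl_cons]
      apply ih
      intro k hk
      rw [PySem.Dict.contains_insert] at hk
      rcases Bool.or_eq_true_iff.mp hk with h1 | h1
      · rwa [show k = key from by simpa using h1]
      · exact h k h1
    · have hc : d.contains key = false := by
        by_contra hc'
        exact hlen (h key (by simpa using hc'))
      have hstep : (if (d.contains key && decide (PySem.Str.len key > 3)) = true then
          d.insert key ((d.get? key).getD 0 + 1)
        else if PySem.Str.len key > 3 then d.insert key 1 else d) = d := by
        rw [if_neg (by simp [hc]), if_neg hlen]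
      rw [List.foldl_cons, hstep, List.filter_cons, if_neg (by simpa using hlen)]
      exact ih d h

-- ===== VERDICT (by name: the statement is the Claim_ definition above) =====
theorem obrabotka_spec : Claim_equal_obrabotka := by
  intro text _
  show obrabotka text = obrabotka_alt text
  unfold obrabotka obrabotka_alt
  dsimp only
  rw [loopA_eq_counter_loop _ _ (fun k hk => by simp [PySem.Dict.contains_empty] at hk)]
  rw [PySem.Dict.foldl_insert_getD_add_one_eq_counter, PySem.Dict.items_counter]
  simp [PySem.List.dedup_eq_ofList]
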